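-- pv_equiv track=rewrite | github.com/Jackytfy/article-to-video | app/pipeline/media/semantic.py | _merge_keywords
-- ===== SOURCE A (Python) =====
-- def _merge_keywords(llm_kw: list[str], rule_kw: list[str]) -> list[str]:
--     """Merge LLM and rule-based keywords, LLM first, dedup."""
--     seen: set[str] = set()
--     result: list[str] = []
--     for kw in llm_kw + rule_kw:
--         if kw.lower() not in seen:
--             seen.add(kw.lower())
--             result.append(kw)
--     return result
-- ===== SOURCE B (Python) =====
-- def _merge_keywords(llm_kw: list[str], rule_kw: list[str]) -> list[str]:
--     """Merge LLM and rule-based keywords, LLM first, dedup case-insensitively,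
--     by staged filtering: repeatedly take the first pending keyword and filter
--     out every later keyword with the same lowercased form (lowercased once,
--     up front, alongside each keyword)."""
--     result: list[str] = []
--     pending = [(kw, kw.lower()) for kw in llm_kw + rule_kw]
--     while pending:
--         head, hl = pending[0]
--         result.append(head)
--         pending = [p for p in pending[1:] if p[1] != hl]
--     return result
-- ===== Notes on version B (the rewrite author's own statement) =====
-- stated objective: alternative
-- what changed: Replaces the single pass with a seen-set membership index by staged selection-style filtering: take the first pending keyword, then rebuild the pending list with all case-insensitive duplicates of it removed, repeating until pending is empty (no auxiliary seen structure at all).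
import Mathlib
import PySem

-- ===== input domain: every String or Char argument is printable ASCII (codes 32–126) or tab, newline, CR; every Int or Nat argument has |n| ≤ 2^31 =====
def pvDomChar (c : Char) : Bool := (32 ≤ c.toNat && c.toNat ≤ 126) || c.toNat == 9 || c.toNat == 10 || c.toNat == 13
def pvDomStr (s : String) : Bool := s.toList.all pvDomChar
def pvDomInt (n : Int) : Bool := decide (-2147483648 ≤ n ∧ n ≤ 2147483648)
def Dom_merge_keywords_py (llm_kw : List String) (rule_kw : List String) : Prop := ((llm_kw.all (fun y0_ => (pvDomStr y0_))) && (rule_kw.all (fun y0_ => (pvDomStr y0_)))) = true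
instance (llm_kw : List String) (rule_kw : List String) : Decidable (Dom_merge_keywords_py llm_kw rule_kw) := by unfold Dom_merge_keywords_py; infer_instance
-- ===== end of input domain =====

-- B drops A's seen-set index entirely: it pairs each keyword with its lowercased form once, then
-- repeatedly takes the first pending pair and filters the rest of its case-insensitive duplicates
-- (objective: alternative).

-- ===== PORT A =====
def merge_keywords_py (llm_kw : List String) (rule_kw : List String) : List String :=
  ((llm_kw ++ rule_kw).foldl
    (fun (st : PySem.Set String × List String) kw =>
      if PySem.Set.contains st.1 (PySem.Str.lower kw) then st
      else (PySem.Set.add st.1 (PySem.Str.lower kw), st.2 ++ [kw]))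
    (PySem.Set.empty, [])).2

-- ===== PORT B =====
-- B's while loop: state (result, pending); pending holds (keyword, lowercased keyword) pairs;
-- each step appends the head's keyword to result and filters the tail of its duplicates.
def pvAltLoop (result : List String) (pending : List (String × String)) : List String :=
  match pending with
  | [] => result
  | (head, hl) :: rest =>
      pvAltLoop (result ++ [head]) (rest.filter (fun p => !(p.2 == hl)))
termination_by pending.length
decreasing_by
  have h := List.length_filter_le (fun p : {p // p ∈ rest} => !(p.1.2 == hl)) rest.attach
  simp at h ⊢
  omega

def merge_keywords_py_alt (llm_kw : List String) (rule_kw : List String) : List String :=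
  pvAltLoop [] ((llm_kw ++ rule_kw).map (fun kw => (kw, PySem.Str.lower kw)))

-- ===== PRECONDITION & SPEC =====
def Spec_merge_keywords_py (llm_kw : List String) (rule_kw : List String) (out : List String) : Prop := out = merge_keywords_py_alt llm_kw rule_kw
instance (llm_kw : List String) (rule_kw : List String) (out : List String) : Decidable (Spec_merge_keywords_py llm_kw rule_kw out) := by unfold Spec_merge_keywords_py; infer_instance

-- ===== CLAIM =====
def Claim_equal_merge_keywords_py : Prop := ∀ (llm_kw : List String) (rule_kw : List String), Dom_merge_keywords_py llm_kw rule_kw → Spec_merge_keywords_py llm_kw rule_kw (merge_keywords_py llm_kw rule_kw)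

-- ===== LEMMAS AND PROOFS =====

theorem pv_contains_add (s : PySem.Set String) (k y : String) :
    PySem.Set.contains (PySem.Set.add s k) y = (PySem.Set.contains s y || (y == k)) := by
  simp only [PySem.Set.contains, PySem.Set.add]
  by_cases h : List.contains s k = true
  · have hk : k ∈ s := by simpa using h
    simp only [h, if_true]
    cases hd : (y == k)
    · simp
    · have he : y = k := by simpa using hd
      subst he
      simp [hk]
  · simp only [h, Bool.false_eq_true, if_false]
    cases hd : (y == k)
    · have he : y ≠ k := by simpa using hd
      simp [he]
    · have he : y = k := by simpa using hd
      subst he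
      simp

-- Loop invariant: A's fold from (seen, result) on l equals B's loop from result on l with the
-- already-seen (lowercased) keywords filtered out of it.
theorem pv_loop (l : List String) :
    ∀ (seen : PySem.Set String) (result : List String),
    (l.foldl
      (fun (st : PySem.Set String × List String) kw =>
        if PySem.Set.contains st.1 (PySem.Str.lower kw) then st
        else (PySem.Set.add st.1 (PySem.Str.lower kw), st.2 ++ [kw]))
      (seen, result)).2
    = pvAltLoop result ((l.map (fun kw => (kw, PySem.Str.lower kw))).filter
        (fun p => !(PySem.Set.contains seen p.2))) := by
  induction l with
  | nil => intro seen result; simp [pvAltLoop]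
  | cons kw tl ih =>
    intro seen result
    simp only [List.foldl_cons, List.map_cons, List.filter_cons]
    by_cases h : PySem.Set.contains seen (PySem.Str.lower kw) = true
    · simp only [h, if_true, Bool.not_true, Bool.false_eq_true, if_false]
      exact ih seen result
    · have hf : PySem.Set.contains seen (PySem.Str.lower kw) = false := by simpa using h
      simp only [hf, Bool.false_eq_true, if_false, Bool.not_false, if_true]
      rw [ih (PySem.Set.add seen (PySem.Str.lower kw)) (result ++ [kw])]
      rw [pvAltLoop]
      congr 1
      rw [List.filter_filter]
      apply List.filter_congr
      intro x _
      rw [pv_contains_add]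
      cases hx : PySem.Set.contains seen x.2 <;>
        cases he : (x.2 == PySem.Str.lower kw) <;> simp

-- ===== VERDICT =====
theorem merge_keywords_py_spec : Claim_equal_merge_keywords_py := by
  intro llm_kw rule_kw _
  unfold Spec_merge_keywords_py merge_keywords_py merge_keywords_py_alt
  rw [pv_loop]
  congr 1
  apply (List.filter_eq_self).2
  intro x _
  simp [PySem.Set.contains, PySem.Set.empty]
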